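-- pv_equiv track=rewrite | github.com/Snopoff/Bioinformatics-Algorithms | rosalind/1 Chapter/mismatches_with_reverse.py | neighbors
-- ===== SOURCE A (Python) =====
-- def hamming(str1: str, str2: str):
--     """
--     Hamming Distance Problem: Compute the Hamming distance between two strings.
--
--     Input: Two strings of equal length.
--     Output: The Hamming distance between these strings.
--
--     """
--     assert len(str1) == len(str2)
--     n = len(str1)
--     res = 0
--     for i in range(0, n):
--         res += str1[i] != str2[i]
--     return res
--
-- def neighbors(pattern: str, d: int):
--     """
--     Neighbors(Pattern, d)
--         if d = 0
--             return {Pattern}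
--         if |Pattern| = 1
--             return {A, C, G, T}
--         Neighborhood ← an empty set
--         SuffixNeighbors ← Neighbors(Suffix(Pattern), d)
--         for each string Text from SuffixNeighbors
--             if HammingDistance(Suffix(Pattern), Text) < d
--                 for each nucleotide x
--                     add x • Text to Neighborhood
--             else
--                 add FirstSymbol(Pattern) • Text to Neighborhood
--         return Neighborhood
--
--     Input: A string Pattern and an integer d.
--     Output: The collection of strings Neighbors(Pattern, d).
--     """
--     nucl = ["A", "C", "G", "T"]
--     if d == 0:
--         return [pattern]
--     if len(pattern) == 1:
--         return nucl
--     neighborhood = []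
--     suffix = pattern[1:]
--     suffixNeighborhood = neighbors(suffix, d)
--     for s in suffixNeighborhood:
--         if hamming(suffix, s) < d:
--             for x in nucl:
--                 neighborhood.append(x + s)
--         else:
--             neighborhood.append(pattern[0] + s)
--
--     return neighborhood
-- ===== SOURCE B (Python) =====
-- def neighbors(pattern: str, d: int):
--     """Iterative bottom-up version of Neighbors(Pattern, d): fold from the last
--     character to the first, maintaining (neighbors-of-current-suffix, suffix)."""
--     if d == 0 or not pattern:
--         return [pattern]
--     nucl = ["A", "C", "G", "T"]
--     res, suffix = list(nucl), pattern[-1]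
--     for c in reversed(pattern[:-1]):
--         new = []
--         for s in res:
--             if sum(a != b for a, b in zip(suffix, s)) < d:
--                 for x in nucl:
--                     new.append(x + s)
--             else:
--                 new.append(c + s)
--         res, suffix = new, c + suffix
--     return res
-- ===== Notes on version B (the rewrite author's own statement) =====
-- stated objective: alternative
-- what changed: Replaces the linear recursion on the suffix by a bottom-up iterative fold over the pattern's characters from last to first, carrying the (neighbor-list, suffix) pair, and computes the Hamming distance by a zip-count instead of an index loop.
import Mathlib
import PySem

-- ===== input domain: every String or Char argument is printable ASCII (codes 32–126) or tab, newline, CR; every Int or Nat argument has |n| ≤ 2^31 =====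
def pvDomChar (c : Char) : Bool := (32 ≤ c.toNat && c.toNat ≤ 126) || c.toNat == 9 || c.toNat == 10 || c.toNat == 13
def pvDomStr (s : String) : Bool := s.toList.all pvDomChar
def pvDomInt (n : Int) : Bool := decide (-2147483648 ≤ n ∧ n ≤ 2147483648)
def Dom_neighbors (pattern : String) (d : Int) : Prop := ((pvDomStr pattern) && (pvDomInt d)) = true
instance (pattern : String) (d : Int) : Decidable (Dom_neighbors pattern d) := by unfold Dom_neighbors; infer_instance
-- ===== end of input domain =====

-- B replaces A's linear recursion by an iterative right-to-left fold carrying the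
-- (neighbor-list, suffix) pair (objective: alternative decomposition, same cost).

-- ===== PORT A =====
-- hamming: index loop `for i in range(n): res += str1[i] != str2[i]` (callers always pass
-- equal-length strings, so the assert never fires and getD's default is never read)
def hammingA (s1 s2 : List Char) : Int :=
  (List.range s1.length).foldl
    (fun res i => res + (if s1.getD i 'A' ≠ s2.getD i 'A' then 1 else 0)) 0

def nuclA : List (List Char) := [['A'], ['C'], ['G'], ['T']]

-- literal port of A's recursion, on the character list; Python diverges on the empty
-- pattern with d ≠ 0 (excluded by Pre_), where this returns []
def neighborsA : List Char → Int → List (List Char)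
  | p, d =>
    if d = 0 then [p]
    else
      match p with
      | [] => []          -- Python recurses forever here (outside Pre_)
      | [_] => nuclA
      | c :: rest =>
        (neighborsA rest d).foldl
          (fun nb s =>
            if hammingA rest s < d then nb ++ nuclA.map (fun x => x ++ s)
            else nb ++ [c :: s]) []

def neighbors (pattern : String) (d : Int) : List String :=
  (neighborsA pattern.toList d).map String.ofList

-- ===== PORT B =====
-- hamming as a zip mismatch count: sum(a != b for a, b in zip(suffix, s))
def hammingB (s1 s2 : List Char) : Int :=
  ((s1.zip s2).countP (fun ab => ab.1 ≠ ab.2) : Nat)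

def nuclB : List (List Char) := [['A'], ['C'], ['G'], ['T']]

def neighbors_alt (pattern : String) (d : Int) : List String :=
  if d = 0 ∨ pattern.toList = [] then [pattern]
  else
    match pattern.toList.reverse with
    | [] => []            -- unreachable: pattern is nonempty here
    | lastC :: restRev =>
      (restRev.foldl
        (fun (st : List (List Char) × List Char) c =>
          (st.1.foldl
            (fun new s =>
              if hammingB st.2 s < d then new ++ nuclB.map (fun x => x ++ s)
              else new ++ [c :: s]) [],
           c :: st.2))
        (nuclB, [lastC])).1.map String.ofList

-- ===== PRECONDITION & SPEC =====
-- Pre_ excludes only the empty pattern with d ≠ 0, on which A recurses forever on its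
-- own (empty) suffix and raises RecursionError; B returns [""] there.
def Pre_neighbors (pattern : String) (d : Int) : Prop := d = 0 ∨ pattern.toList ≠ []
instance (pattern : String) (d : Int) : Decidable (Pre_neighbors pattern d) := by
  unfold Pre_neighbors; infer_instance

def pvWitness_neighbors : String × Int := ("AC", 1)

def Spec_neighbors (pattern : String) (d : Int) (out : List String) : Prop :=
  out = neighbors_alt pattern d
instance (pattern : String) (d : Int) (out : List String) : Decidable (Spec_neighbors pattern d out) := by
  unfold Spec_neighbors; infer_instance

-- ===== CLAIM (what is proved, stated in full; the proofs are below) =====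
def Claim_equal_neighbors : Prop := ∀ (pattern : String) (d : Int),
  Dom_neighbors pattern d → Pre_neighbors pattern d →
  Spec_neighbors pattern d (neighbors pattern d)

-- ===== LEMMAS AND PROOFS =====

-- the two hamming ports agree on equal-length strings (the only way they are called)
lemma hamming_eq : ∀ (s1 s2 : List Char), s1.length = s2.length → hammingA s1 s2 = hammingB s1 s2 := by
  intro s1
  induction s1 with
  | nil => intro s2 h; simp [hammingA, hammingB]
  | cons a s1 ih =>
    intro s2 h
    cases s2 with
    | nil => simp at h
    | cons b s2 =>
      simp only [List.length_cons, Nat.add_right_cancel_iff] at h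
      have hA : hammingA (a :: s1) (b :: s2)
          = (if a ≠ b then (1:Int) else 0) + hammingA s1 s2 := by
        simp only [hammingA, List.length_cons, List.range_succ_eq_map, List.foldl_cons,
          List.foldl_map, List.getD_cons_zero, List.getD_cons_succ]
        rw [PySem.List.foldl_add (g := fun i => if s1.getD i 'A' ≠ s2.getD i 'A' then (1:Int) else 0),
            PySem.List.foldl_add (g := fun i => if s1.getD i 'A' ≠ s2.getD i 'A' then (1:Int) else 0)]
        ring
      rw [hA, ih s2 h]
      simp only [hammingB, List.zip_cons_cons, List.countP_cons]
      by_cases hab : a = b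
      · simp [hab]
      · simp [hab]
        ring

-- every neighbor has the pattern's length
lemma neighborsA_length : ∀ (p : List Char) (d : Int) (s : List Char),
    s ∈ neighborsA p d → s.length = p.length := by
  intro p
  induction p with
  | nil => intro d s hs; unfold neighborsA at hs; split at hs <;> simp_all
  | cons c rest ih =>
    intro d s hs
    unfold neighborsA at hs
    split at hs
    · simp_all
    · match rest, hs with
      | [], hs => simp [nuclA] at hs; rcases hs with h|h|h|h <;> simp [h]
      | (c2 :: r2), hs =>
        dsimp only at hs
        have hfun : (fun (nb : List (List Char)) s => if hammingA (c2 :: r2) s < d then nb ++ nuclA.map (fun x => x ++ s) else nb ++ [c :: s])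
            = fun nb s => nb ++ (if hammingA (c2 :: r2) s < d then nuclA.map (fun x => x ++ s) else [c :: s]) := by
          funext nb s; split <;> rfl
        rw [hfun, PySem.List.foldl_append_eq_flatMap] at hs
        simp only [List.nil_append, List.mem_flatMap] at hs
        obtain ⟨t, ht, hst⟩ := hs
        have hl := ih d t ht
        split at hst
        · simp [nuclA] at hst
          rcases hst with h|h|h|h <;> subst h <;> simp [hl]
        · simp at hst; subst hst; simp [hl]

-- the B fold over the reversed prefix reproduces A's recursion
lemma fold_eq (d : Int) (hd : d ≠ 0) : ∀ (pre : List Char) (lastC : Char),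
    pre.reverse.foldl
      (fun (st : List (List Char) × List Char) c =>
        (st.1.foldl
          (fun new s =>
            if hammingB st.2 s < d then new ++ nuclB.map (fun x => x ++ s)
            else new ++ [c :: s]) [],
         c :: st.2))
      (nuclB, [lastC])
    = (neighborsA (pre ++ [lastC]) d, pre ++ [lastC]) := by
  intro pre
  induction pre with
  | nil =>
    intro lastC
    simp only [List.reverse_nil, List.foldl_nil, List.nil_append]
    rw [neighborsA]
    simp [hd, nuclA, nuclB]
  | cons c pr ih =>
    intro lastC
    rw [List.reverse_cons, List.foldl_append, ih lastC]
    simp only [List.foldl_cons, List.foldl_nil, List.cons_append, Prod.mk.injEq]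
    refine ⟨?_, trivial⟩
    obtain ⟨c2, r2, hpp⟩ : ∃ c2 r2, pr ++ [lastC] = c2 :: r2 := by
      cases pr <;> exact ⟨_, _, rfl⟩
    rw [hpp]
    conv_rhs => rw [neighborsA.eq_def]
    dsimp only
    rw [if_neg hd]
    apply PySem.List.foldl_congr_mem
    intro acc s hs
    rw [hamming_eq (c2 :: r2) s (neighborsA_length _ d s hs).symm]
    simp [nuclA, nuclB]

-- ===== VERDICT (by name: the statement is the Claim_ definition above) =====
theorem neighbors_spec : Claim_equal_neighbors := by
  intro pattern d _ hpre
  unfold Spec_neighbors neighbors neighbors_alt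
  by_cases hd : d = 0
  · subst hd
    rw [if_pos (Or.inl rfl), neighborsA.eq_def]
    simp [String.ofList_toList]
  · have hp : pattern.toList ≠ [] := by
      rcases hpre with h | h
      · exact absurd h hd
      · exact h
    rw [if_neg (by tauto)]
    obtain ⟨lastC, restRev, hrev⟩ : ∃ lastC restRev, pattern.toList.reverse = lastC :: restRev := by
      cases hr : pattern.toList.reverse with
      | nil => exact absurd (by simpa using congrArg List.reverse hr) hp
      | cons a l => exact ⟨a, l, rfl⟩
    have hpl : pattern.toList = restRev.reverse ++ [lastC] := by
      have := congrArg List.reverse hrev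
      simpa using this
    rw [hrev]
    dsimp only
    have := fold_eq d hd restRev.reverse lastC
    rw [List.reverse_reverse] at this
    rw [this, ← hpl]
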